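-- pv_equiv track=rewrite | github.com/JoseManuelGdlO/car-advisor-bot | bot/src/server.py | _collect_tail_ai_messages
-- ===== SOURCE A (Python) =====
-- from typing import Any
--
-- def _collect_tail_ai_messages(messages: list[dict[str, Any]]) -> list[dict[str, Any]]:
--     """Retorna mensajes de asistente consecutivos al final del historial."""
--
--     collected: list[dict[str, Any]] = []
--     for message in reversed(messages):
--         if message.get("role") != "assistant":
--             break
--         collected.append(message)
--     collected.reverse()
--     return collected
-- ===== SOURCE B (Python) =====
-- from typing import Any
--
-- def _collect_tail_ai_messages(messages: list[dict[str, Any]]) -> list[dict[str, Any]]: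
--     """Retorna mensajes de asistente consecutivos al final del historial."""
--     run: list[dict[str, Any]] = []
--     for message in messages:
--         if message.get("role") == "assistant":
--             run.append(message)
--         else:
--             run = []
--     return run
-- ===== Notes on version B (the rewrite author's own statement) =====
-- stated objective: alternative
-- what changed: B scans FORWARD once, growing a run of assistant messages and resetting it to empty on any non-assistant message, so the run left at the end is the trailing assistant run; A scans backward over reversed(messages) with a break and reverses the collected list.
import Mathlib
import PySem

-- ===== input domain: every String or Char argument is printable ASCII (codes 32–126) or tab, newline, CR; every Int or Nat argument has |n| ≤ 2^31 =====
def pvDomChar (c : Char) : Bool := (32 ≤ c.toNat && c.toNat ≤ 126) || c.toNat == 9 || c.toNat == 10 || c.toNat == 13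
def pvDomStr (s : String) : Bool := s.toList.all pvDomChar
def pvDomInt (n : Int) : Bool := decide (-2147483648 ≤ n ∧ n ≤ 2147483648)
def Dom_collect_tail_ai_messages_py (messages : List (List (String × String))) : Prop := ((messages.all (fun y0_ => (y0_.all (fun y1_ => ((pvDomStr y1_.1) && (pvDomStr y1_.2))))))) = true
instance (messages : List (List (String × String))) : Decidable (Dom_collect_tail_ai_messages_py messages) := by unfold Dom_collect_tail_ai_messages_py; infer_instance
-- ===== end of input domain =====

-- B replaces A's backward scan-and-reverse by ONE forward pass that grows a run of
-- assistant messages and resets it on any other message (objective: alternative).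

-- dict.get(k): first-match lookup in the association list (the dict convention)
def pvDictGet (m : List (String × String)) (k : String) : Option String :=
  (m.find? (fun p => p.1 == k)).map (·.2)

-- ===== PORT A =====
-- the 'for message in reversed(messages): if …: break; collected.append(message)' loop
def pvGoA : List (List (String × String)) → List (List (String × String))
  | [] => []
  | m :: rest =>
    if pvDictGet m "role" ≠ some "assistant" then []
    else m :: pvGoA rest

def collect_tail_ai_messages_py (messages : List (List (String × String))) : List (List (String × String)) :=
  (pvGoA messages.reverse).reverse

-- ===== PORT B =====
-- forward pass: append to the run on assistant, reset the run otherwise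
def collect_tail_ai_messages_py_alt (messages : List (List (String × String))) : List (List (String × String)) :=
  messages.foldl
    (fun run m => if pvDictGet m "role" = some "assistant" then run ++ [m] else []) []

-- ===== PRECONDITION & SPEC =====
def Spec_collect_tail_ai_messages_py (messages : List (List (String × String))) (out : List (List (String × String))) : Prop := out = collect_tail_ai_messages_py_alt messages
instance (messages : List (List (String × String))) (out : List (List (String × String))) : Decidable (Spec_collect_tail_ai_messages_py messages out) := by unfold Spec_collect_tail_ai_messages_py; infer_instance

-- ===== CLAIM =====
def Claim_equal_collect_tail_ai_messages_py : Prop := ∀ (messages : List (List (String × String))), Dom_collect_tail_ai_messages_py messages → Spec_collect_tail_ai_messages_py messages (collect_tail_ai_messages_py messages)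

-- ===== LEMMAS AND PROOFS =====

theorem pv_main (messages : List (List (String × String))) :
    (pvGoA messages.reverse).reverse
      = messages.foldl
          (fun run m => if pvDictGet m "role" = some "assistant" then run ++ [m] else []) [] := by
  induction messages using List.reverseRecOn with
  | nil => simp [pvGoA]
  | append_singleton rest m ih =>
    rw [List.foldl_append, ← ih]
    simp only [List.foldl_cons, List.foldl_nil, List.reverse_append, List.reverse_cons,
      List.reverse_nil, List.nil_append, List.cons_append]
    by_cases hc : pvDictGet m "role" = some "assistant"
    · simp [pvGoA, hc]
    · simp [pvGoA, hc]

-- ===== VERDICT =====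
theorem collect_tail_ai_messages_py_spec : Claim_equal_collect_tail_ai_messages_py := by
  intro messages _
  unfold Spec_collect_tail_ai_messages_py collect_tail_ai_messages_py collect_tail_ai_messages_py_alt
  exact pv_main messages
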